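-- pv_equiv track=rewrite | github.com/itsmiladlotfi/DIM_graph_project | dim.py | is_matching
-- ===== SOURCE A (Python) =====
-- def is_matching(matching):
--     used_vertices = set()
--
--     for u, v in matching:
--         if u in used_vertices or v in used_vertices:
--             return False
--         used_vertices.add(u)
--         used_vertices.add(v)
--
--     return True
-- ===== SOURCE B (Python) =====
-- def is_matching(matching):
--     # Two-pass: build a frequency table of vertices (self-loop endpoints
--     # deduped via set(edge)), then check no vertex occurs in two edges.
--     counts = {}
--     for edge in matching:
--         for x in set(edge):
--             counts[x] = counts.get(x, 0) + 1
--     return all(c < 2 for c in counts.values())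
-- ===== Notes on version B (the rewrite author's own statement) =====
-- stated objective: alternative
-- what changed: Replaced the incremental seen-set scan with early exit by a two-pass frequency table: count each distinct endpoint of every edge, then check that no vertex is counted twice.
import Mathlib
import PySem

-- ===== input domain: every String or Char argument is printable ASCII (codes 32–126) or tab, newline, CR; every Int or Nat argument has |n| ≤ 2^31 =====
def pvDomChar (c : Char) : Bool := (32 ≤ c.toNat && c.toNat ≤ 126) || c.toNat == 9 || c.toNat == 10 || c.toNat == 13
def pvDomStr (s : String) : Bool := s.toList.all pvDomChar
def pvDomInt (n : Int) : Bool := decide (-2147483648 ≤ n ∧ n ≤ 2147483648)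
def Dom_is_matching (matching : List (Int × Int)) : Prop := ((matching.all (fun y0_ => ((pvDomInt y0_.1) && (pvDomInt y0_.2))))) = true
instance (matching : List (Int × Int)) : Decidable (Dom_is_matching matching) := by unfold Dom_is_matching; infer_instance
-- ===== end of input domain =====

-- B replaces A's incremental seen-set scan (early exit) by a two-pass frequency
-- table over vertices; objective: alternative (same cost, different decomposition).

-- ===== PORT A =====
-- the for-loop with early 'return False', seen set threaded through
def isMatchingGo : List (Int × Int) → PySem.Set Int → Bool
  | [], _ => true
  | (u, v) :: rest, used =>
      if PySem.Set.contains used u || PySem.Set.contains used v then false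
      else isMatchingGo rest (PySem.Set.add (PySem.Set.add used u) v)

def is_matching (matching : List (Int × Int)) : Bool :=
  isMatchingGo matching PySem.Set.empty

-- ===== PORT B =====
def is_matching_alt (matching : List (Int × Int)) : Bool :=
  -- counts[x] = counts.get(x, 0) + 1 over set(edge); result is order-insensitive
  let counts : PySem.Dict Int Int :=
    matching.foldl
      (fun d e => (PySem.Set.ofList [e.1, e.2]).foldl
        (fun d x => d.insert x (d.getD x 0 + 1)) d)
      PySem.Dict.empty
  counts.values.all (fun c => decide (c < 2))

-- ===== PRECONDITION & SPEC =====
def Spec_is_matching (matching : List (Int × Int)) (out : Bool) : Prop := out = is_matching_alt matching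
instance (matching : List (Int × Int)) (out : Bool) : Decidable (Spec_is_matching matching out) := by unfold Spec_is_matching; infer_instance

-- ===== CLAIM (what is proved, stated in full; the proofs are below) =====
def Claim_equal_is_matching : Prop := ∀ (matching : List (Int × Int)), Dom_is_matching matching → Spec_is_matching matching (is_matching matching)

-- ===== LEMMAS AND PROOFS =====

-- number of edges of m containing vertex x (a self-loop counts once)
def vcnt (m : List (Int × Int)) (x : Int) : Nat :=
  m.countP (fun e => x == e.1 || x == e.2)

-- two edges share no vertex
def edisj (e f : Int × Int) : Prop :=
  e.1 ≠ f.1 ∧ e.1 ≠ f.2 ∧ e.2 ≠ f.1 ∧ e.2 ≠ f.2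

-- A's loop invariant
theorem isMatchingGo_iff (m : List (Int × Int)) (used : PySem.Set Int) :
    isMatchingGo m used = true ↔
      m.Pairwise edisj ∧ ∀ e ∈ m, e.1 ∉ used ∧ e.2 ∉ used := by
  induction m generalizing used with
  | nil => simp [isMatchingGo]
  | cons e rest ih =>
      obtain ⟨u, v⟩ := e
      by_cases h : (PySem.Set.contains used u || PySem.Set.contains used v) = true
      · have hfalse : isMatchingGo ((u, v) :: rest) used = false := by
          rw [show isMatchingGo ((u, v) :: rest) used
              = if (PySem.Set.contains used u || PySem.Set.contains used v) then false
                else isMatchingGo rest (PySem.Set.add (PySem.Set.add used u) v) from rfl,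
            if_pos h]
        rw [hfalse]
        simp only [Bool.or_eq_true, PySem.Set.contains_iff] at h
        constructor
        · intro hc; exact absurd hc (by decide)
        · rintro ⟨-, hall⟩
          have := hall (u, v) (by simp)
          simp only at this
          rcases h with h | h
          · exact absurd h this.1
          · exact absurd h this.2
      · have hstep : isMatchingGo ((u, v) :: rest) used
            = isMatchingGo rest (PySem.Set.add (PySem.Set.add used u) v) := by
          rw [show isMatchingGo ((u, v) :: rest) used
              = if (PySem.Set.contains used u || PySem.Set.contains used v) then false
                else isMatchingGo rest (PySem.Set.add (PySem.Set.add used u) v) from rfl,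
            if_neg h]
        rw [hstep, ih]
        simp only [Bool.or_eq_true, PySem.Set.contains_iff, not_or] at h
        simp only [List.pairwise_cons, List.mem_cons, PySem.Set.mem_add, edisj]
        constructor
        · rintro ⟨hp, hall⟩
          refine ⟨⟨fun f hf => ?_, hp⟩, ?_⟩
          · have := hall f hf; tauto
          · rintro f (rfl | hf)
            · exact ⟨h.1, h.2⟩
            · have := hall f hf; tauto
        · rintro ⟨⟨hd, hp⟩, hall⟩
          refine ⟨hp, fun f hf => ?_⟩
          have h1 := hall f (Or.inr hf)
          have h2 := hd f hf
          tauto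

theorem is_matching_iff (m : List (Int × Int)) :
    is_matching m = true ↔ m.Pairwise edisj := by
  rw [is_matching, isMatchingGo_iff]
  simp [PySem.Set.empty]

-- pairwise disjointness ↔ every vertex in at most one edge
theorem pairwise_iff_vcnt (m : List (Int × Int)) :
    m.Pairwise edisj ↔ ∀ x : Int, vcnt m x ≤ 1 := by
  induction m with
  | nil => simp [vcnt]
  | cons e rest ih =>
      simp only [List.pairwise_cons, vcnt, List.countP_cons] at *
      constructor
      · rintro ⟨hd, hp⟩ x
        by_cases hx : (x == e.1 || x == e.2) = true
        · simp only [hx, if_pos]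
          have h0 : rest.countP (fun f => x == f.1 || x == f.2) = 0 := by
            rw [List.countP_eq_zero]
            intro f hf
            have := hd f hf
            simp only [edisj] at this
            simp only [Bool.or_eq_true, beq_iff_eq] at hx ⊢
            push Not
            rcases hx with rfl | rfl <;> tauto
          omega
        · simp only [hx, if_neg, Bool.not_eq_true] at *
          simpa using (ih.1 hp) x
      · intro hall
        have hp : rest.Pairwise edisj :=
          ih.2 (fun x => by have := hall x; split_ifs at this <;> omega)
        refine ⟨fun f hf => ?_, hp⟩
        simp only [edisj]
        have key : ∀ x : Int, (x == e.1 || x == e.2) = true →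
            (x == f.1 || x == f.2) = true → False := by
          intro x hx hf'
          have hb := hall x
          rw [if_pos hx] at hb
          have hpos : 0 < rest.countP (fun g => x == g.1 || x == g.2) :=
            List.countP_pos_iff.mpr ⟨f, hf, hf'⟩
          omega
        refine ⟨?_, ?_, ?_, ?_⟩
        · intro hh; exact key e.1 (by simp) (by simp [hh])
        · intro hh; exact key e.1 (by simp) (by simp [hh])
        · intro hh; exact key e.2 (by simp) (by simp [hh])
        · intro hh; exact key e.2 (by simp) (by simp [hh])

-- B counts vertices: the dict lookup is vcnt
theorem counts_getD (m : List (Int × Int)) (d : PySem.Dict Int Int) (x : Int) :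
    (m.foldl (fun d e => (PySem.Set.ofList [e.1, e.2]).foldl
        (fun d x => d.insert x (d.getD x 0 + 1)) d) d).getD x 0
      = d.getD x 0 + (vcnt m x : Int) := by
  induction m generalizing d with
  | nil => simp [vcnt]
  | cons e rest ih =>
      rw [List.foldl_cons, ih]
      rw [PySem.Dict.getD_foldl_insert_add_one]
      have hc : (PySem.Set.ofList [e.1, e.2]).count x
          = (if (x == e.1 || x == e.2) = true then 1 else 0) := by
        rcases eq_or_ne e.2 e.1 with h12 | h12 <;>
          rcases eq_or_ne x e.1 with h1 | h1 <;>
          rcases eq_or_ne x e.2 with h2 | h2 <;>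
          simp_all [PySem.Set.ofList, PySem.Set.add, PySem.Set.contains, List.count_cons] <;> omega
      rw [hc]
      simp only [vcnt, List.countP_cons]
      split_ifs <;> push_cast <;> ring

theorem counts_keys_nodup (m : List (Int × Int)) (d : PySem.Dict Int Int)
    (h : d.keys.Nodup) :
    (m.foldl (fun d e => (PySem.Set.ofList [e.1, e.2]).foldl
        (fun d x => d.insert x (d.getD x 0 + 1)) d) d).keys.Nodup := by
  induction m generalizing d with
  | nil => exact h
  | cons e rest ih =>
      exact ih _ (PySem.Dict.nodup_keys_foldl_insert _ _ _ h)

theorem is_matching_alt_iff (m : List (Int × Int)) :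
    is_matching_alt m = true ↔ ∀ x : Int, vcnt m x ≤ 1 := by
  rw [is_matching_alt]
  set counts : PySem.Dict Int Int :=
    m.foldl (fun d e => (PySem.Set.ofList [e.1, e.2]).foldl
      (fun d x => d.insert x (d.getD x 0 + 1)) d) PySem.Dict.empty with hc
  have hnd : counts.keys.Nodup :=
    counts_keys_nodup m PySem.Dict.empty (by simp [PySem.Dict.keys_empty])
  have hg : ∀ x : Int, counts.getD x 0 = (vcnt m x : Int) := by
    intro x; rw [hc, counts_getD]; simp [PySem.Dict.getD_empty]
  rw [PySem.Dict.values_eq_map_keys counts hnd 0]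
  simp only [List.all_map, List.all_eq_true, Function.comp, decide_eq_true_eq]
  constructor
  · intro h x
    by_cases hk : x ∈ counts.keys
    · have := h x hk; rw [hg] at this; omega
    · have h0 : counts.getD x 0 = 0 := by
        have hn := (PySem.Dict.get?_eq_none_iff_not_mem_keys counts x).mpr hk
        simp [PySem.Dict.getD, hn]
      rw [hg] at h0; omega
  · intro h k _
    rw [hg]
    have := h k; omega

-- ===== VERDICT (by name: the statement is the Claim_ definition above) =====
theorem is_matching_spec : Claim_equal_is_matching := by
  intro m _
  unfold Spec_is_matching
  have h1 := (is_matching_iff m).trans (pairwise_iff_vcnt m)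
  have h2 := is_matching_alt_iff m
  cases ha : is_matching m
  · cases hb : is_matching_alt m
    · rfl
    · exact absurd (h1.mpr (h2.mp hb)) (by simp [ha])
  · cases hb : is_matching_alt m
    · exact absurd (h2.mpr (h1.mp ha)) (by simp [hb])
    · rfl
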